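-- pv_equiv track=rewrite | github.com/JuKoWi/hotcent_fork_dipole | hotcent/slako.py | search_integrals
-- ===== SOURCE A (Python) =====
-- INTEGRAL_PAIRS = {
--     'sss': ('s', 's'),
--     'sps': ('s', 'pz'),
--     'sds': ('s', 'dz2'),
--     'sfs': ('s', 'fz3'),
--     'pps': ('pz', 'pz'),
--     'ppp': ('px', 'px'),
--     'pds': ('pz', 'dz2'),
--     'pdp': ('px', 'dxz'),
--     'pfs': ('pz', 'fz3'),
--     'pfp': ('px', 'fxz2'),
--     'dds': ('dz2', 'dz2'),
--     'ddp': ('dxz', 'dxz'),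
--     'ddd': ('dxy', 'dxy'),
--     'dfs': ('dz2', 'fz3'),
--     'dfp': ('dxz', 'fxz2'),
--     'dfd': ('dxy', 'fxyz'),
--     'ffs': ('fz3', 'fz3'),
--     'ffp': ('fxz2', 'fxz2'),
--     'ffd': ('fxyz', 'fxyz'),
--     'fff': ('fx(x2-3y2)', 'fx(x2-3y2)'),
-- }
--
-- def search_integrals(lm1, lm2):
--     """ Returns the sigma/pi/... integrals to be considered for the
--     given pair of orbitals. """
--     integrals, ordered = [], []
--
--     for integral, pair in INTEGRAL_PAIRS.items():
--         if pair == (lm1, lm2):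
--             integrals.append(integral)
--             ordered.append(True)
--         elif pair == (lm2, lm1):
--             integrals.append(integral)
--             ordered.append(False)
--
--     return integrals, ordered
-- ===== SOURCE B (Python) =====
-- # Classify each orbital by its angular momentum l and its symmetry index m
-- # (position within the shell: sigma=0, pi=1, delta=2, phi=3).  Two orbitals
-- # contribute an integral exactly when they share the same symmetry index, and
-- # the integral's name is then composed arithmetically from the shell letters
-- # and the symmetry letter -- no table scan at all.
-- ORBITALS = {
--     's': (0, 0),
--     'pz': (1, 0), 'px': (1, 1),
--     'dz2': (2, 0), 'dxz': (2, 1), 'dxy': (2, 2),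
--     'fz3': (3, 0), 'fxz2': (3, 1), 'fxyz': (3, 2), 'fx(x2-3y2)': (3, 3),
-- }
--
-- SHELLS = ['s', 'p', 'd', 'f']
--
-- def search_integrals(lm1, lm2):
--     """ Returns the sigma/pi/... integrals to be considered for the
--     given pair of orbitals. """
--     o1 = ORBITALS.get(lm1)
--     o2 = ORBITALS.get(lm2)
--     if o1 is None or o2 is None:
--         return [], []
--     l1, m1 = o1
--     l2, m2 = o2
--     if m1 != m2:
--         return [], []
--     if l1 <= l2:
--         return [SHELLS[l1] + SHELLS[l2] + SHELLS[m1]], [True]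
--     return [SHELLS[l2] + SHELLS[l1] + SHELLS[m1]], [False]
-- ===== Notes on version B (the rewrite author's own statement) =====
-- stated objective: alternative
-- what changed: Replaced the scan over the INTEGRAL_PAIRS table with an arithmetic construction: each orbital is classified by (shell l, symmetry index m); a pair matches iff the symmetry indices agree, and the integral name is composed from the shell letters and the symmetry letter, so no integral table exists in B at all.
import Mathlib
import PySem

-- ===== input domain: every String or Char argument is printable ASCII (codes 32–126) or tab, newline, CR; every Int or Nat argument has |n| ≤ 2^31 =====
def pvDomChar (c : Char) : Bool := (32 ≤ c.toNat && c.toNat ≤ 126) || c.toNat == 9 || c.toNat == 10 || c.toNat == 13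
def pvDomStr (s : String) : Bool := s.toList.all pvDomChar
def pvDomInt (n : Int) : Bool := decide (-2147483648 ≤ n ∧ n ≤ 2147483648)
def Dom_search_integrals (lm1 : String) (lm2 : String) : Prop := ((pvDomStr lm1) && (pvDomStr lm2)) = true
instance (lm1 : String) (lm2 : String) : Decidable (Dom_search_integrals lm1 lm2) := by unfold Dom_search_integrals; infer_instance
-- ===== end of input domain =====

-- B drops the INTEGRAL_PAIRS table entirely: it classifies each orbital by
-- (shell, symmetry index) and composes the integral name arithmetically; objective: alternative.


-- ===== PORT A =====
-- INTEGRAL_PAIRS: a literal dict, ported as an association list in insertion order.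
def INTEGRAL_PAIRS : List (String × (String × String)) :=
  [("sss", ("s", "s")),
   ("sps", ("s", "pz")),
   ("sds", ("s", "dz2")),
   ("sfs", ("s", "fz3")),
   ("pps", ("pz", "pz")),
   ("ppp", ("px", "px")),
   ("pds", ("pz", "dz2")),
   ("pdp", ("px", "dxz")),
   ("pfs", ("pz", "fz3")),
   ("pfp", ("px", "fxz2")),
   ("dds", ("dz2", "dz2")),
   ("ddp", ("dxz", "dxz")),
   ("ddd", ("dxy", "dxy")),
   ("dfs", ("dz2", "fz3")),
   ("dfp", ("dxz", "fxz2")),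
   ("dfd", ("dxy", "fxyz")),
   ("ffs", ("fz3", "fz3")),
   ("ffp", ("fxz2", "fxz2")),
   ("ffd", ("fxyz", "fxyz")),
   ("fff", ("fx(x2-3y2)", "fx(x2-3y2)"))]

-- A: loop over INTEGRAL_PAIRS.items(), appending to (integrals, ordered).
def search_integrals (lm1 : String) (lm2 : String) : List String × List Bool :=
  INTEGRAL_PAIRS.foldl
    (fun (acc : List String × List Bool) kv =>
      if kv.2 = (lm1, lm2) then (acc.1 ++ [kv.1], acc.2 ++ [true])
      else if kv.2 = (lm2, lm1) then (acc.1 ++ [kv.1], acc.2 ++ [false])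
      else acc)
    ([], [])

-- ===== PORT B =====
-- ORBITALS: orbital name -> (shell l, symmetry index m).
def ORBITALS : List (String × (Nat × Nat)) :=
  [("s", (0, 0)),
   ("pz", (1, 0)), ("px", (1, 1)),
   ("dz2", (2, 0)), ("dxz", (2, 1)), ("dxy", (2, 2)),
   ("fz3", (3, 0)), ("fxz2", (3, 1)), ("fxyz", (3, 2)), ("fx(x2-3y2)", (3, 3))]

def SHELLS : List String := ["s", "p", "d", "f"]

-- B: classify both orbitals; same symmetry index ⇒ compose the name from the
-- shell letters.  SHELLS indexing via getD is exact: indices are always 0..3.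
def search_integrals_alt (lm1 : String) (lm2 : String) : List String × List Bool :=
  match ORBITALS.lookup lm1 with
  | none => ([], [])
  | some (l1, m1) =>
    match ORBITALS.lookup lm2 with
    | none => ([], [])
    | some (l2, m2) =>
      if m1 ≠ m2 then ([], [])
      else if l1 ≤ l2 then
        ([SHELLS.getD l1 "" ++ SHELLS.getD l2 "" ++ SHELLS.getD m1 ""], [true])
      else
        ([SHELLS.getD l2 "" ++ SHELLS.getD l1 "" ++ SHELLS.getD m1 ""], [false])

-- ===== PRECONDITION & SPEC =====
def Spec_search_integrals (lm1 : String) (lm2 : String) (out : List String × List Bool) : Prop := out = search_integrals_alt lm1 lm2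
instance (lm1 : String) (lm2 : String) (out : List String × List Bool) : Decidable (Spec_search_integrals lm1 lm2 out) := by unfold Spec_search_integrals; infer_instance

-- ===== CLAIM (what is proved, stated in full; the proofs are below) =====
def Claim_equal_search_integrals : Prop := ∀ (lm1 : String) (lm2 : String), Dom_search_integrals lm1 lm2 → Spec_search_integrals lm1 lm2 (search_integrals lm1 lm2)

-- ===== LEMMAS AND PROOFS =====

-- The orbital names known to either program; any other string matches nothing.
def ORBS : List String :=
  ["s", "pz", "px", "dz2", "dxz", "dxy", "fz3", "fxz2", "fxyz", "fx(x2-3y2)"]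

theorem pair_beq (a b c d : String) : ((a, b) == (c, d)) = (a == c && b == d) := rfl

theorem main_eq : ∀ (lm1 lm2 : String),
    search_integrals lm1 lm2 = search_integrals_alt lm1 lm2 := by
  intro lm1 lm2
  by_cases h1 : lm1 ∈ ORBS
  · by_cases h2 : lm2 ∈ ORBS
    · fin_cases h1 <;> fin_cases h2 <;> decide
    · -- lm2 is no orbital name: A's branch conditions all mention lm2 and B's
      -- second lookup fails, so both return ([], []).
      obtain ⟨n1, n2, n3, n4, n5, n6, n7, n8, n9, n10⟩ :
          lm2 ≠ "s" ∧ lm2 ≠ "pz" ∧ lm2 ≠ "px" ∧ lm2 ≠ "dz2" ∧ lm2 ≠ "dxz" ∧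
          lm2 ≠ "dxy" ∧ lm2 ≠ "fz3" ∧ lm2 ≠ "fxz2" ∧ lm2 ≠ "fxyz" ∧
          lm2 ≠ "fx(x2-3y2)" := by
        simpa [ORBS, not_or] using h2
      fin_cases h1 <;>
      simp [search_integrals, search_integrals_alt, INTEGRAL_PAIRS, ORBITALS,
        List.foldl, List.lookup, pair_beq, Prod.mk.injEq,
        beq_eq_false_iff_ne.mpr n1, beq_eq_false_iff_ne.mpr n2, beq_eq_false_iff_ne.mpr n3,
        beq_eq_false_iff_ne.mpr n4, beq_eq_false_iff_ne.mpr n5, beq_eq_false_iff_ne.mpr n6,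
        beq_eq_false_iff_ne.mpr n7, beq_eq_false_iff_ne.mpr n8, beq_eq_false_iff_ne.mpr n9,
        beq_eq_false_iff_ne.mpr n10,
        Ne.symm n1, Ne.symm n2, Ne.symm n3, Ne.symm n4, Ne.symm n5,
        Ne.symm n6, Ne.symm n7, Ne.symm n8, Ne.symm n9, Ne.symm n10]
  · obtain ⟨n1, n2, n3, n4, n5, n6, n7, n8, n9, n10⟩ :
        lm1 ≠ "s" ∧ lm1 ≠ "pz" ∧ lm1 ≠ "px" ∧ lm1 ≠ "dz2" ∧ lm1 ≠ "dxz" ∧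
        lm1 ≠ "dxy" ∧ lm1 ≠ "fz3" ∧ lm1 ≠ "fxz2" ∧ lm1 ≠ "fxyz" ∧
        lm1 ≠ "fx(x2-3y2)" := by
      simpa [ORBS, not_or] using h1
    simp [search_integrals, search_integrals_alt, INTEGRAL_PAIRS, ORBITALS,
      List.foldl, List.lookup, pair_beq, Prod.mk.injEq,
      beq_eq_false_iff_ne.mpr n1, beq_eq_false_iff_ne.mpr n2, beq_eq_false_iff_ne.mpr n3,
      beq_eq_false_iff_ne.mpr n4, beq_eq_false_iff_ne.mpr n5, beq_eq_false_iff_ne.mpr n6,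
      beq_eq_false_iff_ne.mpr n7, beq_eq_false_iff_ne.mpr n8, beq_eq_false_iff_ne.mpr n9,
      beq_eq_false_iff_ne.mpr n10,
      Ne.symm n1, Ne.symm n2, Ne.symm n3, Ne.symm n4, Ne.symm n5,
      Ne.symm n6, Ne.symm n7, Ne.symm n8, Ne.symm n9, Ne.symm n10]

-- ===== VERDICT (by name: the statement is the Claim_ definition above) =====
theorem search_integrals_spec : Claim_equal_search_integrals := by
  intro lm1 lm2 _
  exact main_eq lm1 lm2
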